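-- pv_equiv track=rewrite | github.com/CodyBuilder-dev/Algorithm-Coding-Test | problems/programmers/lv4/pgs-81304-dict-wrong.py | swap_board
-- ===== SOURCE A (Python) =====
-- from copy import deepcopy
--
-- def swap_board(board, trap_str):
--     new_board = deepcopy(board)
--
--     for i, v in enumerate(trap_str):
--         if v == "1":
--             for k in new_board:
--                 if k == i:
--                     for e in new_board[k]:
--                         new_board[k][e][1] *= -1
--                 elif i in new_board[k]:
--                     new_board[k][i][1] *= -1
--
--     return new_board
-- ===== SOURCE B (Python) =====
-- def swap_board(board, trap_str):
--     trap = {i for i, v in enumerate(trap_str) if v == "1"}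
--     out = {}
--     for a, adj in board.items():
--         row = {}
--         for b, l in adj.items():
--             l = list(l)
--             if (a in trap) != (b in trap and a != b):
--                 l[1] = -l[1]
--             row[b] = l
--         out[a] = row
--     return out
-- ===== Notes on version B (the rewrite author's own statement) =====
-- stated objective: faster
-- what changed: A rescans every board key (and its whole inner dict) once per trap index; B precomputes the trap set once and makes a single pass over the edges, flipping an edge's sign exactly when its source is a trap XOR its distinct target is a trap.
import Mathlib
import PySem

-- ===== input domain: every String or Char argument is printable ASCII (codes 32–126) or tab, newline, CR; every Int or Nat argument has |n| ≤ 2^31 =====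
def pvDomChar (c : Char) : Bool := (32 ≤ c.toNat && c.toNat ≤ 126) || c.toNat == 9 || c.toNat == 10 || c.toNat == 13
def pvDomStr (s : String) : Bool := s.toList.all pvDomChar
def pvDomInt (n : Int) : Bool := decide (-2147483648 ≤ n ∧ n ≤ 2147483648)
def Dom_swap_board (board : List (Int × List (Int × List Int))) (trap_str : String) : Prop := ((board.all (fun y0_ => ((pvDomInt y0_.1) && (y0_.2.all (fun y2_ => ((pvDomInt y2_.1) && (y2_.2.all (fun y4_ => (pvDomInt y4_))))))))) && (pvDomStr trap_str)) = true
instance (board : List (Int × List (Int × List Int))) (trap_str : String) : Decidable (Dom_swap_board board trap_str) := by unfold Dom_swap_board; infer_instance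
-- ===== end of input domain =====

-- B replaces A's per-trap scan over all dict keys by one pass over the edges consulting a
-- precomputed trap set, via the parity rule (source-trap XOR distinct-target-trap).

-- ===== PORT A =====
-- l[1] *= -1 ; exact when l has ≥ 2 elements (guaranteed by Pre_ wherever A executes it);
-- identity where Python would raise IndexError (outside Pre_)
def pyFlip1 (l : List Int) : List Int :=
  match l with
  | a :: b :: t => a :: (-b) :: t
  | l => l

-- new_board[k][i][1] *= -1 : dict store modifies the (first = unique) entry with key i
def modFirst (adj : List (Int × List Int)) (i : Int) : List (Int × List Int) :=
  match adj with
  | [] => []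
  | (k, l) :: t => if k = i then (k, pyFlip1 l) :: t else (k, l) :: modFirst t i

-- i in new_board[k]
def containsKey (adj : List (Int × List Int)) (i : Int) : Bool := adj.any (fun q => q.1 == i)

-- new_board[k] (dict lookup, first match; a Python dict's keys are unique)
def lookupD (nb : List (Int × List (Int × List Int))) (k : Int) : List (Int × List Int) :=
  ((nb.find? (fun p => p.1 == k)).map (·.2)).getD []

-- in-place update of the (first = unique) board entry with key k
def modOuter (nb : List (Int × List (Int × List Int))) (k : Int)
    (f : List (Int × List Int) → List (Int × List Int)) : List (Int × List (Int × List Int)) :=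
  match nb with
  | [] => []
  | (a, adj) :: t => if a = k then (a, f adj) :: t else (a, adj) :: modOuter t k f

-- loop body of 'for k in new_board: …' for one trap index i
def bodyA (i : Int) (d : List (Int × List (Int × List Int))) (k : Int) : List (Int × List (Int × List Int)) :=
  if k = i then
    -- for e in new_board[k]: new_board[k][e][1] *= -1
    modOuter d k (fun adj => (adj.map (·.1)).foldl (fun a e => modFirst a e) adj)
  else if containsKey (lookupD d k) i then
    modOuter d k (fun adj => modFirst adj i)
  else d

def stepTrap (nb : List (Int × List (Int × List Int))) (i : Int) : List (Int × List (Int × List Int)) :=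
  (nb.map (·.1)).foldl (bodyA i) nb

def swap_board (board : List (Int × List (Int × List Int))) (trap_str : String) : List (Int × List (Int × List Int)) :=
  (PySem.List.enumerate trap_str.toList).foldl
    (fun nb p => if p.2 == '1' then stepTrap nb p.1 else nb) board

-- ===== PORT B =====
-- l2 = list(l); l2[1] = -l2[1] (only reached, inside Pre_, when l has ≥ 2 elements)
def negAt1 (l : List Int) : List Int :=
  match l with
  | a :: b :: t => a :: (-b) :: t
  | l => l

-- trap = {i for i, v in enumerate(trap_str) if v == "1"}
def trapSet (trap_str : String) : PySem.Set Int :=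
  PySem.Set.ofList (((PySem.List.enumerate trap_str.toList).filter (fun p => p.2 == '1')).map (·.1))

def swap_board_alt (board : List (Int × List (Int × List Int))) (trap_str : String) : List (Int × List (Int × List Int)) :=
  let trap := trapSet trap_str
  board.map (fun p =>
    (p.1, p.2.map (fun q =>
      (q.1, if trap.contains p.1 != (trap.contains q.1 && p.1 != q.1) then negAt1 q.2 else q.2))))

-- ===== PRECONDITION & SPEC =====
-- index k of trap_str is a trap ('1' at that position)
def isTrap (s : String) (k : Int) : Bool :=
  (PySem.List.enumerate s.toList).any (fun p => p.1 == k && p.2 == '1')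

-- Pre_ excludes (a) association lists with duplicate keys, which do not represent any Python
-- dict input (a dict's keys are unique), and (b) inputs on which A raises IndexError: an edge
-- list shorter than 2 whose sign A would flip (trap source, or distinct trap target).
def Pre_swap_board (board : List (Int × List (Int × List Int))) (trap_str : String) : Prop :=
  (board.map (·.1)).Nodup ∧
  ∀ p ∈ board, (p.2.map (·.1)).Nodup ∧
    ∀ q ∈ p.2, (isTrap trap_str p.1 = true ∨ (isTrap trap_str q.1 = true ∧ q.1 ≠ p.1)) → 2 ≤ q.2.length

instance (board : List (Int × List (Int × List Int))) (trap_str : String) : Decidable (Pre_swap_board board trap_str) := by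
  unfold Pre_swap_board; infer_instance

def pvWitness_swap_board : (List (Int × List (Int × List Int))) × String :=
  ([(0, [(1, [5, 7]), (0, [2, -3])]), (1, [(0, [2, 3])])], "10")

def Spec_swap_board (board : List (Int × List (Int × List Int))) (trap_str : String) (out : List (Int × List (Int × List Int))) : Prop := out = swap_board_alt board trap_str
instance (board : List (Int × List (Int × List Int))) (trap_str : String) (out : List (Int × List (Int × List Int))) : Decidable (Spec_swap_board board trap_str out) := by unfold Spec_swap_board; infer_instance

-- ===== CLAIM (what is proved, stated in full; the proofs are below) =====
def Claim_equal_swap_board : Prop := ∀ (board : List (Int × List (Int × List Int))) (trap_str : String), Dom_swap_board board trap_str → Pre_swap_board board trap_str → Spec_swap_board board trap_str (swap_board board trap_str)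

-- ===== LEMMAS AND PROOFS =====

theorem pyFlip1_pyFlip1 (l : List Int) : pyFlip1 (pyFlip1 l) = l := by
  match l with
  | [] => rfl
  | [a] => rfl
  | a :: b :: t => simp [pyFlip1]

theorem negAt1_eq (l : List Int) : negAt1 l = pyFlip1 l := by
  match l with
  | [] => rfl
  | [a] => rfl
  | a :: b :: t => rfl

theorem map_flip_of_absent (adj : List (Int × List Int)) (i : Int)
    (h : ∀ q ∈ adj, q.1 ≠ i) :
    adj.map (fun q => (q.1, if q.1 = i then pyFlip1 q.2 else q.2)) = adj := by
  induction adj with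
  | nil => rfl
  | cons q t ih =>
    have hk : q.1 ≠ i := h q (by simp)
    simp [hk, ih (fun q hq => h q (by simp [hq]))]

theorem modFirst_eq_map (adj : List (Int × List Int)) (i : Int)
    (h : (adj.map (·.1)).Nodup) :
    modFirst adj i = adj.map (fun q => (q.1, if q.1 = i then pyFlip1 q.2 else q.2)) := by
  induction adj with
  | nil => rfl
  | cons q t ih =>
    obtain ⟨k, l⟩ := q
    simp only [List.map_cons, List.nodup_cons] at h
    by_cases hk : k = i
    · subst hk
      have habs : ∀ q ∈ t, q.1 ≠ k := by
        intro q hq hqk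
        exact h.1 (hqk ▸ List.mem_map_of_mem hq)
      simp [modFirst, map_flip_of_absent t k habs]
    · simp [modFirst, hk, ih h.2]

theorem foldl_modFirst_cons (ks : List Int) (k : Int) (x : List Int)
    (t : List (Int × List Int)) (h : k ∉ ks) :
    ks.foldl (fun a e => modFirst a e) ((k, x) :: t)
      = (k, x) :: ks.foldl (fun a e => modFirst a e) t := by
  induction ks generalizing t with
  | nil => rfl
  | cons e ks ih =>
    have hek : k ≠ e := fun hh => h (by simp [hh])
    have h' : k ∉ ks := fun hh => h (List.mem_cons_of_mem _ hh)
    simp only [List.foldl_cons]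
    rw [show modFirst ((k, x) :: t) e = (k, x) :: modFirst t e by simp [modFirst, hek]]
    exact ih (modFirst t e) h'

theorem foldl_modFirst_eq_map (adj : List (Int × List Int))
    (h : (adj.map (·.1)).Nodup) :
    (adj.map (·.1)).foldl (fun a e => modFirst a e) adj
      = adj.map (fun q => (q.1, pyFlip1 q.2)) := by
  induction adj with
  | nil => rfl
  | cons q t ih =>
    obtain ⟨k, l⟩ := q
    simp only [List.map_cons, List.nodup_cons] at h
    simp only [List.map_cons, List.foldl_cons]
    rw [show modFirst ((k, l) :: t) k = (k, pyFlip1 l) :: t by simp [modFirst]]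
    rw [foldl_modFirst_cons _ _ _ _ h.1, ih h.2]

theorem bodyA_cons (i e a : Int) (adj : List (Int × List Int))
    (t : List (Int × List (Int × List Int))) (h : a ≠ e) :
    bodyA i ((a, adj) :: t) e = (a, adj) :: bodyA i t e := by
  have hfind : (((a, adj) :: t).find? (fun p => p.1 == e)) = t.find? (fun p => p.1 == e) := by
    have hae : (a == e) = false := by simp [h]
    simp [List.find?, hae]
  unfold bodyA lookupD
  rw [hfind]
  split_ifs <;> simp_all [modOuter]

theorem foldl_bodyA_cons (i : Int) (ks : List Int) (a : Int) (adj : List (Int × List Int))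
    (t : List (Int × List (Int × List Int))) (h : a ∉ ks) :
    ks.foldl (bodyA i) ((a, adj) :: t) = (a, adj) :: ks.foldl (bodyA i) t := by
  induction ks generalizing t with
  | nil => rfl
  | cons e ks ih =>
    have hae : a ≠ e := fun hh => h (by simp [hh])
    have h' : a ∉ ks := fun hh => h (List.mem_cons_of_mem _ hh)
    simp only [List.foldl_cons]
    rw [bodyA_cons i e a adj t hae]
    exact ih (bodyA i t e) h'

theorem bodyA_head (i a : Int) (adj : List (Int × List Int))
    (t : List (Int × List (Int × List Int))) (hadj : (adj.map (·.1)).Nodup) :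
    bodyA i ((a, adj) :: t) a
      = (a, adj.map (fun q => (q.1, if a = i ∨ q.1 = i then pyFlip1 q.2 else q.2))) :: t := by
  have hlook : lookupD ((a, adj) :: t) a = adj := by simp [lookupD, List.find?]
  unfold bodyA
  rw [hlook]
  by_cases hai : a = i
  · subst hai
    rw [if_pos rfl]
    simp [modOuter, foldl_modFirst_eq_map adj hadj]
  · rw [if_neg hai]
    by_cases hc : containsKey adj i = true
    · rw [if_pos hc]
      simp only [modOuter]
      rw [modFirst_eq_map adj i hadj]
      simp [hai]
    · rw [if_neg hc]
      have habs : ∀ q ∈ adj, q.1 ≠ i := by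
        intro q hq hqi
        exact hc (List.any_eq_true.mpr ⟨q, hq, by simp [hqi]⟩)
      have : adj.map (fun q => (q.1, if a = i ∨ q.1 = i then pyFlip1 q.2 else q.2))
           = adj.map (fun q => (q.1, if q.1 = i then pyFlip1 q.2 else q.2)) := by
        apply List.map_congr_left; intro q _; simp [hai]
      rw [this, map_flip_of_absent adj i habs]

-- the per-trap pass acts on each edge (a, b) as: flip iff a = i or b = i
theorem stepTrap_eq_map (nb : List (Int × List (Int × List Int))) (i : Int)
    (h1 : (nb.map (·.1)).Nodup) (h2 : ∀ p ∈ nb, (p.2.map (·.1)).Nodup) :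
    stepTrap nb i = nb.map (fun p =>
      (p.1, p.2.map (fun q => (q.1, if p.1 = i ∨ q.1 = i then pyFlip1 q.2 else q.2)))) := by
  induction nb with
  | nil => rfl
  | cons p t ih =>
    obtain ⟨a, adj⟩ := p
    simp only [List.map_cons, List.nodup_cons] at h1
    have hadj : (adj.map (·.1)).Nodup := (h2 (a, adj) (by simp))
    show (a :: t.map (·.1)).foldl (bodyA i) ((a, adj) :: t) = _
    rw [List.foldl_cons, bodyA_head i a adj t hadj, foldl_bodyA_cons i _ a _ t h1.1]
    have := ih h1.2 (fun p hp => h2 p (List.mem_cons_of_mem _ hp))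
    rw [show (t.map (·.1)).foldl (bodyA i) t = stepTrap t i from rfl, this]
    simp

theorem flip_parity (n : Nat) (c : Prop) [Decidable c] (l : List Int) :
    (if n % 2 = 1 then pyFlip1 (if c then pyFlip1 l else l) else (if c then pyFlip1 l else l))
      = if (n + (if c then 1 else 0)) % 2 = 1 then pyFlip1 l else l := by
  by_cases hc : c <;> by_cases hn : n % 2 = 1
  · rw [if_pos hc, if_pos hc, if_pos hn, pyFlip1_pyFlip1, if_neg (by omega)]
  · rw [if_pos hc, if_pos hc, if_neg hn, if_pos (by omega)]
  · rw [if_neg hc, if_neg hc, if_pos hn, if_pos (by omega)]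
  · rw [if_neg hc, if_neg hc, if_neg hn, if_neg (by omega)]

theorem foldl_stepTrap (ts : List Int) (board : List (Int × List (Int × List Int)))
    (h1 : (board.map (·.1)).Nodup) (h2 : ∀ p ∈ board, (p.2.map (·.1)).Nodup) :
    ts.foldl stepTrap board = board.map (fun p =>
      (p.1, p.2.map (fun q =>
        (q.1, if (ts.countP (fun i => decide (p.1 = i ∨ q.1 = i))) % 2 = 1 then pyFlip1 q.2 else q.2)))) := by
  induction ts generalizing board with
  | nil => simp
  | cons i ts ih =>
    rw [List.foldl_cons, stepTrap_eq_map board i h1 h2]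
    have h1' : ((board.map (fun p => (p.1, p.2.map (fun q => (q.1, if p.1 = i ∨ q.1 = i then pyFlip1 q.2 else q.2))))).map (·.1)).Nodup := by
      simpa [List.map_map, Function.comp] using h1
    have h2' : ∀ p' ∈ board.map (fun p => (p.1, p.2.map (fun q => (q.1, if p.1 = i ∨ q.1 = i then pyFlip1 q.2 else q.2)))), (p'.2.map (·.1)).Nodup := by
      intro p' hp'
      obtain ⟨p, hp, rfl⟩ := List.mem_map.mp hp'
      simpa [List.map_map, Function.comp] using h2 p hp
    rw [ih _ h1' h2']
    rw [List.map_map]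
    apply List.map_congr_left
    intro p _
    simp only [Function.comp]
    rw [List.map_map]
    refine congrArg (Prod.mk p.1) ?_
    apply List.map_congr_left
    intro q _
    simp only [Function.comp]
    refine congrArg (Prod.mk q.1) ?_
    rw [List.countP_cons, flip_parity]
    simp

theorem countP_or_nodup (ts : List Int) (h : ts.Nodup) (a b : Int) :
    ts.countP (fun i => decide (a = i ∨ b = i))
      = (if a ∈ ts then 1 else 0) + (if b ∈ ts ∧ b ≠ a then 1 else 0) := by
  induction ts with
  | nil => simp
  | cons i t ih =>
    simp only [List.nodup_cons] at h
    rw [List.countP_cons, ih h.2]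
    by_cases h1 : a = i <;> by_cases h2 : b = i <;>
      by_cases h3 : a ∈ t <;> by_cases h4 : b ∈ t <;> by_cases h5 : b = a <;>
      subst_vars <;> simp_all

theorem nodup_trapIdx (s : String) :
    ((((PySem.List.enumerate s.toList).filter (fun p => p.2 == '1')).map (·.1)) : List Int).Nodup := by
  have hp : (PySem.List.enumerate s.toList).Pairwise (fun p q => p.1 < q.1) :=
    PySem.List.pairwise_lt_enumerate _ _
  have hf := hp.filter (fun p => p.2 == '1')
  have hm : ((((PySem.List.enumerate s.toList).filter (fun p => p.2 == '1')).map (·.1)) : List Int).Pairwise (· < ·) :=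
    List.pairwise_map.mpr hf
  exact hm.imp (fun h => ne_of_lt h)

-- ===== VERDICT (by name: the statement is the Claim_ definition above) =====
theorem swap_board_spec : Claim_equal_swap_board := by
  intro board trap_str _ hPre
  obtain ⟨h1, h2⟩ := hPre
  unfold Spec_swap_board swap_board swap_board_alt trapSet
  rw [PySem.List.foldl_if_eq_foldl_filter]
  rw [← List.foldl_map]
  rw [foldl_stepTrap _ board h1 (fun p hp => (h2 p hp).1)]
  apply List.map_congr_left
  intro p _
  refine congrArg (Prod.mk p.1) ?_
  apply List.map_congr_left
  intro q _
  refine congrArg (Prod.mk q.1) ?_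
  rw [negAt1_eq]
  set ts := (((PySem.List.enumerate trap_str.toList).filter (fun p => p.2 == '1')).map (·.1)) with hts
  rw [countP_or_nodup ts (nodup_trapIdx trap_str) p.1 q.1]
  have hcont : ∀ x : Int, (PySem.Set.ofList ts).contains x = decide (x ∈ ts) := by
    intro x
    simp [PySem.Set.contains, PySem.Set.mem_ofList]
  rw [hcont, hcont]
  by_cases hE : p.1 = q.1
  · by_cases hB : q.1 ∈ ts <;> simp [hB, hE]
  · have hE' : q.1 ≠ p.1 := fun hh => hE hh.symm
    by_cases hA : p.1 ∈ ts <;> by_cases hB : q.1 ∈ ts <;> simp [hA, hB, hE, hE']
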